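-- pv_equiv track=rewrite | github.com/post-soybeen/samuraipack | plato/plot.py | AutoMarker
-- ===== SOURCE A (Python) =====
-- _markers = ["o","v","^","<",">","8","s","p","P","*","h","H","D","d","X"]
--
-- def AutoMarker(n, source=None):
--     markers = []
--     m = len(_markers)
--     for i in range(n):
--         if source is None :
--             markers.append(_markers[i%m])
--         else :
--             markers.append(source)
--     return markers
-- ===== SOURCE B (Python) =====
-- _markers = ["o","v","^","<",">","8","s","p","P","*","h","H","D","d","X"]
--
-- def AutoMarker(n, source=None):
--     if source is not None:
--         return [source] * n
--     return (_markers * (n // len(_markers) + 1))[:n]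
-- ===== Notes on version B (the rewrite author's own statement) =====
-- stated objective: idiomatic
-- what changed: Replaces the per-element loop with its modulo index and branch by case analysis before any loop: [source]*n for a given source, and _markers*(n//len+1) sliced to n for the cyclic case.
import Mathlib
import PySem

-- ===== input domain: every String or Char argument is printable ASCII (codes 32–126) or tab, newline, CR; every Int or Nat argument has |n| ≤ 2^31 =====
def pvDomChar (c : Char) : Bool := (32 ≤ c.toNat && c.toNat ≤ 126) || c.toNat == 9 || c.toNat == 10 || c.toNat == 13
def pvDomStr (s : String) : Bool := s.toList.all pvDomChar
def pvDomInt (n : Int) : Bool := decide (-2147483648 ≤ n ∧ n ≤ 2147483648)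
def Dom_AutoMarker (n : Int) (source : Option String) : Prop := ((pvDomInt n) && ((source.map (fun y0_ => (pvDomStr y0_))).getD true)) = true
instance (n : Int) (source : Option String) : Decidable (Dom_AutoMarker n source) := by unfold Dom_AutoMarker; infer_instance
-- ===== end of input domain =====

-- B replaces A's per-element loop (modulo index + branch per iteration) by case analysis
-- before any loop: [source]*n, or _markers repeated n//len+1 times and sliced to n (idiomatic, same O(n)).

def pvMarkers : List String := ["o","v","^","<",">","8","s","p","P","*","h","H","D","d","X"]

-- ===== PORT A =====
def AutoMarker (n : Int) (source : Option String) : List String :=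
  let m : Int := (pvMarkers.length : Int)
  (PySem.List.pyRange 0 n 1).foldl (fun markers i =>
    match source with
    | none => markers ++ [PySem.List.pyGetD pvMarkers (PySem.Int.mod i m) ""]  -- 0 ≤ i%m < m: never raises
    | some s => markers ++ [s]) []

-- ===== PORT B =====
def AutoMarker_alt (n : Int) (source : Option String) : List String :=
  match source with
  | some s => List.replicate n.toNat s  -- [source] * n (negative n gives [])
  | none =>
    PySem.List.slice ((List.replicate (PySem.Int.floordiv n (pvMarkers.length : Int) + 1).toNat pvMarkers).flatten)
      none (some n)  -- (_markers * (n // len(_markers) + 1))[:n]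

-- ===== PRECONDITION & SPEC =====
def Spec_AutoMarker (n : Int) (source : Option String) (out : List String) : Prop := out = AutoMarker_alt n source
instance (n : Int) (source : Option String) (out : List String) : Decidable (Spec_AutoMarker n source out) := by unfold Spec_AutoMarker; infer_instance

-- ===== CLAIM (what is proved, stated in full; the proofs are below) =====
def Claim_equal_AutoMarker : Prop := ∀ (n : Int) (source : Option String), Dom_AutoMarker n source → Spec_AutoMarker n source (AutoMarker n source)

-- ===== LEMMAS AND PROOFS =====

-- element j of L repeated k times is L[j % len(L)]
lemma getD_flatten_replicate {α : Type} (L : List α) (d : α) (k j : Nat) (hj : j < k * L.length) :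
    ((List.replicate k L).flatten).getD j d = L.getD (j % L.length) d := by
  induction k generalizing j with
  | zero => omega
  | succ k ih =>
    rw [Nat.succ_mul] at hj
    simp only [List.replicate_succ, List.flatten_cons]
    by_cases h : j < L.length
    · rw [List.getD_eq_getElem?_getD, List.getElem?_append_left h, ← List.getD_eq_getElem?_getD,
        Nat.mod_eq_of_lt h]
    · rw [List.getD_eq_getElem?_getD, List.getElem?_append_right (by omega),
        ← List.getD_eq_getElem?_getD, ih (j - L.length) (by omega),
        Nat.mod_eq_sub_mod (le_of_not_gt h)]

lemma len_flatten_replicate {α : Type} (L : List α) (k : Nat) :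
    ((List.replicate k L).flatten).length = k * L.length := by
  simp [List.length_flatten]

lemma AutoMarker_eq_alt : ∀ (n : Int) (source : Option String), AutoMarker n source = AutoMarker_alt n source := by
  intro n source
  unfold AutoMarker AutoMarker_alt
  rcases source with _ | s
  · by_cases hn : 0 ≤ n
    · obtain ⟨N, rfl⟩ : ∃ N : Nat, n = (N : Int) := ⟨n.toNat, (Int.toNat_of_nonneg hn).symm⟩
      have hm : (pvMarkers.length : Int) = ((15 : Nat) : Int) := by decide
      have hNk : N < (N / 15 + 1) * 15 := by omega
      rw [PySem.List.pyRange_zero_natCast, hm, PySem.Int.floordiv_natCast,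
        PySem.List.slice_to _ (by exact_mod_cast hn)]
      simp only [List.foldl_map, PySem.List.foldl_append_singleton_eq_map, List.nil_append]
      have hcast : ((((N / 15 : Nat) : Int)) + 1).toNat = N / 15 + 1 := by omega
      rw [hcast, Int.toNat_natCast]
      have hflen : ((List.replicate (N / 15 + 1) pvMarkers).flatten).length = (N / 15 + 1) * 15 := by
        rw [len_flatten_replicate]; rfl
      apply List.ext_getElem
      · simp [hflen]; omega
      · intro j hj hj'
        have hjN : j < N := by simpa using hj
        rw [List.getElem_take, List.getElem_map, List.getElem_range,
          ← List.getD_eq_getElem _ "" (by rw [hflen]; omega),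
          getD_flatten_replicate _ _ _ _ (by simpa using (by omega : j < (N/15+1) * 15)),
          PySem.Int.mod_natCast, PySem.List.pyGetD_natCast]
        norm_num [pvMarkers]
    · have hr : PySem.List.pyRange 0 n 1 = [] := by simp [PySem.List.pyRange]; omega
      have ht : PySem.List.slice ((List.replicate (PySem.Int.floordiv n (pvMarkers.length : Int) + 1).toNat pvMarkers).flatten) none (some n) = [] := by
        have hk : (PySem.Int.floordiv n (pvMarkers.length : Int) + 1).toNat = 0 := by
          have h1 : PySem.Int.floordiv n 15 < 0 := by
            have := PySem.Int.floordiv_mul_add_mod n 15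
            have := PySem.Int.mod_nonneg n (b := 15) (by norm_num)
            have := PySem.Int.mod_lt n (b := 15) (by norm_num)
            nlinarith [this]
          have hm : (pvMarkers.length : Int) = 15 := by decide
          rw [hm]; omega
        rw [hk]; simp [PySem.List.slice]
      rw [hr, ht]; rfl
  · by_cases hn : 0 ≤ n
    · obtain ⟨N, rfl⟩ : ∃ N : Nat, n = (N : Int) := ⟨n.toNat, (Int.toNat_of_nonneg hn).symm⟩
      rw [PySem.List.pyRange_zero_natCast]
      simp [List.foldl_map]
    · have hr : PySem.List.pyRange 0 n 1 = [] := by simp [PySem.List.pyRange]; omega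
      rw [hr, Int.toNat_of_nonpos (le_of_not_ge hn)]; rfl

-- ===== VERDICT (by name: the statement is the Claim_ definition above) =====
theorem AutoMarker_spec : Claim_equal_AutoMarker := by
  intro n source _
  unfold Spec_AutoMarker
  exact AutoMarker_eq_alt n source
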